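-- pv_equiv track=rewrite | github.com/MikkoParkkola/AgentsMCP | src/agentsmcp/ui/components/enhanced_chat.py | _looks_like_code
-- ===== SOURCE A (Python) =====
-- def _looks_like_code(text: str) -> bool:
--     """Heuristic to detect if text contains code."""
--     code_indicators = [
--         'def ', 'class ', 'import ', 'from ',  # Python
--         'function', 'var ', 'const ', 'let ',  # JavaScript
--         '{', '}', ';',  # General code indicators
--         '```',  # Markdown code blocks
--     ]
--
--     # Check for multiple indicators or specific patterns
--     indicator_count = sum(1 for indicator in code_indicators if indicator in text)
--
--     # Also check for indentation patterns common in code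
--     lines = text.split('\n')
--     indented_lines = sum(1 for line in lines if line.startswith(('  ', '\t')))
--
--     return indicator_count >= 2 or (len(lines) > 1 and indented_lines > 0)
-- ===== SOURCE B (Python) =====
-- def _looks_like_code(text: str) -> bool:
--     """Heuristic to detect if text contains code (single line-by-line sweep)."""
--     code_indicators = [
--         'def ', 'class ', 'import ', 'from ',
--         'function', 'var ', 'const ', 'let ',
--         '{', '}', ';',
--         '```',
--     ]
--     lines = text.split('\n')
--     seen = set()
--     indented = 0
--     for line in lines:
--         if line.startswith(('  ', '\t')):
--             indented += 1
--         for indicator in code_indicators: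
--             if indicator in line:
--                 seen.add(indicator)
--     return len(seen) >= 2 or (len(lines) > 1 and indented > 0)
-- ===== Notes on version B (the rewrite author's own statement) =====
-- stated objective: alternative
-- what changed: A scans the whole text once per indicator and then scans the split lines separately; B makes a single sweep over the lines, accumulating a set of indicators seen per line and an indented-line counter, then applies the same final test.
import Mathlib
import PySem

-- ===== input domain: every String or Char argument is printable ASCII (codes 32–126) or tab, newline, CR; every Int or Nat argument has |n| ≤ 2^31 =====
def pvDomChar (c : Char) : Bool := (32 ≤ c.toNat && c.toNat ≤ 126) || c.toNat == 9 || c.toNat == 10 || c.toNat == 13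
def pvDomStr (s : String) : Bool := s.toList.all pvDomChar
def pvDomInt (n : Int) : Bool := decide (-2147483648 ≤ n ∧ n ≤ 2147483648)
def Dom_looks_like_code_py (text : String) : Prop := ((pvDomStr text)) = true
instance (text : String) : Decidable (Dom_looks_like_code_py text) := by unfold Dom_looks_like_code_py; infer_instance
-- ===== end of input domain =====

-- B replaces A's indicator-over-whole-text scan plus separate indentation scan by a single
-- line-by-line sweep accumulating a set of indicators seen and an indented-line counter
-- (objective: alternative decomposition, one pass over the lines).

-- ===== PORT A =====
def codeIndicatorsA : List (List Char) :=
  ["def ".toList, "class ".toList, "import ".toList, "from ".toList,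
   "function".toList, "var ".toList, "const ".toList, "let ".toList,
   "{".toList, "}".toList, ";".toList, "```".toList]

def looks_like_code_py (text : String) : Bool :=
  let indicator_count := codeIndicatorsA.countP (fun ind => PySem.Chars.isIn ind text.toList)
  let lines := PySem.Chars.splitOn text.toList ['\n']
  let indented_lines := lines.countP (fun line =>
    PySem.Chars.startswith line [' ', ' '] || PySem.Chars.startswith line ['\t'])
  decide (2 ≤ indicator_count) || (decide (1 < lines.length) && decide (0 < indented_lines))

-- ===== PORT B =====
def codeIndicatorsB : List (List Char) :=
  ["def ".toList, "class ".toList, "import ".toList, "from ".toList,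
   "function".toList, "var ".toList, "const ".toList, "let ".toList,
   "{".toList, "}".toList, ";".toList, "```".toList]

-- loop body of B's single sweep: bump the indent counter, then add every indicator of this line
def altStep (st : PySem.Set (List Char) × Nat) (line : List Char) : PySem.Set (List Char) × Nat :=
  let st1 := if PySem.Chars.startswith line [' ', ' '] || PySem.Chars.startswith line ['\t']
             then (st.1, st.2 + 1) else st
  (codeIndicatorsB.foldl (fun s ind => if PySem.Chars.isIn ind line then PySem.Set.add s ind else s) st1.1,
   st1.2)

def looks_like_code_py_alt (text : String) : Bool :=
  let lines := PySem.Chars.splitOn text.toList ['\n']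
  let r := lines.foldl altStep (PySem.Set.empty, 0)
  decide (2 ≤ PySem.Set.len r.1) || (decide (1 < lines.length) && decide (0 < r.2))

-- ===== PRECONDITION & SPEC =====
def Spec_looks_like_code_py (text : String) (out : Bool) : Prop := out = looks_like_code_py_alt text
instance (text : String) (out : Bool) : Decidable (Spec_looks_like_code_py text out) := by unfold Spec_looks_like_code_py; infer_instance

-- ===== CLAIM (what is proved, stated in full; the proofs are below) =====
def Claim_equal_looks_like_code_py : Prop := ∀ (text : String), Dom_looks_like_code_py text → Spec_looks_like_code_py text (looks_like_code_py text)

-- ===== LEMMAS AND PROOFS =====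

-- clean recursion for text.split('\n'), proof-side only
def myLines : List Char → List (List Char)
  | [] => [[]]
  | c :: rest =>
    if c = '\n' then [] :: myLines rest
    else match myLines rest with
      | h :: t => (c :: h) :: t
      | [] => [[c]]

theorem myLines_ne_nil (s : List Char) : myLines s ≠ [] := by
  match s with
  | [] => simp [myLines]
  | c :: rest =>
    simp only [myLines]
    split
    · simp
    · split <;> simp

theorem myLines_head_ex (s : List Char) : ∃ h t, myLines s = h :: t := by
  cases hr : myLines s with
  | nil => exact absurd hr (myLines_ne_nil s)
  | cons a b => exact ⟨a, b, rfl⟩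

theorem splitOn_go_eq (fuel : Nat) :
    ∀ (l cur : List Char) (acc : List (List Char)) (h : List Char) (t : List (List Char)),
      l.length < fuel → myLines l = h :: t →
      PySem.Chars.splitOn.go ['\n'] fuel l cur acc = acc.reverse ++ (cur.reverse ++ h) :: t := by
  induction fuel with
  | zero => intro l cur acc h t hlt; omega
  | succ f ih =>
    intro l cur acc h t hlt hml
    match l with
    | [] =>
      simp [myLines] at hml
      obtain ⟨rfl, rfl⟩ := hml
      simp [PySem.Chars.splitOn.go]
    | c :: rest =>
      by_cases hc : c = '\n'
      · subst hc
        simp only [myLines] at hml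
        rw [if_true] at hml
        rw [PySem.Chars.splitOn.go]
        rw [if_pos (by simp [List.isPrefixOf])]
        obtain ⟨rfl, rfl⟩ : h = [] ∧ myLines rest = t := by
          cases hml; exact ⟨rfl, rfl⟩
        obtain ⟨h', t', hml'⟩ := myLines_head_ex rest
        simp only [List.length_cons, List.length_nil, List.drop_succ_cons, List.drop_zero]
        rw [ih _ _ _ _ _ (by simpa using Nat.lt_of_succ_lt_succ hlt) hml']
        simp [hml']
      · simp only [myLines] at hml
        rw [if_neg hc] at hml
        obtain ⟨h', t', hml'⟩ := myLines_head_ex rest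
        rw [hml'] at hml
        obtain ⟨rfl, rfl⟩ : h = c :: h' ∧ t' = t := by cases hml; exact ⟨rfl, rfl⟩
        rw [PySem.Chars.splitOn.go]
        rw [if_neg (by simp [List.isPrefixOf]; exact fun e => hc e.symm)]
        rw [ih _ _ _ _ _ (by simpa using Nat.lt_of_succ_lt_succ hlt) hml']
        simp

theorem splitOn_newline (s : List Char) :
    PySem.Chars.splitOn s ['\n'] = myLines s := by
  obtain ⟨h, t, hml⟩ := myLines_head_ex s
  rw [PySem.Chars.splitOn, splitOn_go_eq _ _ _ _ _ _ (by omega) hml]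
  simp [hml]

theorem prefix_iff_head (s : List Char) :
    ∀ (p h : List Char) (t : List (List Char)), '\n' ∉ p → myLines s = h :: t →
      (p <+: s ↔ p <+: h) := by
  induction s with
  | nil =>
    intro p h t hp hml
    simp [myLines] at hml
    simp [hml.1]
  | cons c rest ih =>
    intro p h t hp hml
    by_cases hc : c = '\n'
    · subst hc
      simp only [myLines, if_true] at hml
      obtain ⟨rfl, rfl⟩ : h = [] ∧ myLines rest = t := by cases hml; exact ⟨rfl, rfl⟩
      cases p with
      | nil => simp
      | cons x p' =>
        constructor
        · intro hpre
          rw [List.cons_prefix_cons] at hpre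
          exact absurd (hpre.1 ▸ List.mem_cons_self) hp
        · intro hpre; simp at hpre
    · simp only [myLines, if_neg hc] at hml
      obtain ⟨h', t', hml'⟩ := myLines_head_ex rest
      rw [hml'] at hml
      obtain ⟨rfl, rfl⟩ : h = c :: h' ∧ t' = t := by cases hml; exact ⟨rfl, rfl⟩
      cases p with
      | nil => simp
      | cons x p' =>
        rw [List.cons_prefix_cons, List.cons_prefix_cons]
        have := ih p' h' t' (fun hm => hp (List.mem_cons_of_mem _ hm)) hml'
        tauto

theorem infix_iff_lines (s : List Char) :
    ∀ (p : List Char), '\n' ∉ p → p ≠ [] →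
      (p <:+: s ↔ ∃ l ∈ myLines s, p <:+: l) := by
  induction s with
  | nil => intro p hp hne; simp [myLines]
  | cons c rest ih =>
    intro p hp hne
    rw [List.infix_cons_iff]
    by_cases hc : c = '\n'
    · subst hc
      simp only [myLines, if_true]
      have hnp : ¬ p <+: '\n' :: rest := by
        cases p with
        | nil => exact absurd rfl hne
        | cons x p' =>
          intro hpre
          rw [List.cons_prefix_cons] at hpre
          exact absurd (hpre.1 ▸ List.mem_cons_self) hp
      have hni : ¬ p <:+: ([] : List Char) := by
        intro hinf; exact hne (List.eq_nil_of_infix_nil hinf)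
      rw [ih p hp hne]
      simp only [List.mem_cons]
      constructor
      · rintro (h | ⟨l, hl, hil⟩)
        · exact absurd h hnp
        · exact ⟨l, Or.inr hl, hil⟩
      · rintro ⟨l, (rfl | hl), hil⟩
        · exact absurd hil hni
        · exact Or.inr ⟨l, hl, hil⟩
    · simp only [myLines, if_neg hc]
      obtain ⟨h', t', hml'⟩ := myLines_head_ex rest
      rw [hml']
      have hpre := prefix_iff_head (c :: rest) p (c :: h') t' hp
        (by simp only [myLines, if_neg hc, hml'])
      rw [ih p hp hne, hml']
      simp only [List.mem_cons]
      constructor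
      · rintro (h | ⟨l, (rfl | hl), hil⟩)
        · exact ⟨c :: h', Or.inl rfl, List.infix_cons_iff.mpr (Or.inl (hpre.mp h))⟩
        · exact ⟨c :: l, Or.inl rfl, List.infix_cons_iff.mpr (Or.inr hil)⟩
        · exact ⟨l, Or.inr hl, hil⟩
      · rintro ⟨l, (rfl | hl), hil⟩
        · rcases List.infix_cons_iff.mp hil with h | h
          · exact Or.inl (hpre.mpr h)
          · exact Or.inr ⟨h', Or.inl rfl, h⟩
        · exact Or.inr ⟨l, Or.inr hl, hil⟩

theorem isIn_iff_exists_line (p s : List Char) (hp : '\n' ∉ p) (hne : p ≠ []) :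
    (PySem.Chars.isIn p s = true ↔ ∃ l ∈ myLines s, PySem.Chars.isIn p l = true) := by
  rw [PySem.Chars.isIn_iff_infix, infix_iff_lines s p hp hne]
  constructor
  · rintro ⟨l, hl, hil⟩; exact ⟨l, hl, (PySem.Chars.isIn_iff_infix _ _).mpr hil⟩
  · rintro ⟨l, hl, hil⟩; exact ⟨l, hl, (PySem.Chars.isIn_iff_infix _ _).mp hil⟩

theorem inner_fold (line : List Char) :
    ∀ (inds : List (List Char)) (s0 : PySem.Set (List Char)), s0.Nodup →
      ((inds.foldl (fun s ind => if PySem.Chars.isIn ind line then PySem.Set.add s ind else s) s0).Nodup ∧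
       ∀ x, x ∈ inds.foldl (fun s ind => if PySem.Chars.isIn ind line then PySem.Set.add s ind else s) s0 ↔
         x ∈ s0 ∨ (x ∈ inds ∧ PySem.Chars.isIn x line = true)) := by
  intro inds
  induction inds with
  | nil => intro s0 h0; simpa using h0
  | cons i rest ih =>
    intro s0 h0
    simp only [List.foldl_cons]
    by_cases hi : PySem.Chars.isIn i line = true
    · rw [if_pos hi]
      obtain ⟨hn, hm⟩ := ih (PySem.Set.add s0 i) (PySem.Set.nodup_add s0 i h0)
      refine ⟨hn, fun x => ?_⟩
      rw [hm x, PySem.Set.mem_add]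
      simp only [List.mem_cons]
      constructor
      · rintro ((h | rfl) | ⟨h1, h2⟩)
        · exact Or.inl h
        · exact Or.inr ⟨Or.inl rfl, hi⟩
        · exact Or.inr ⟨Or.inr h1, h2⟩
      · rintro (h | ⟨(rfl | h1), h2⟩)
        · exact Or.inl (Or.inl h)
        · exact Or.inl (Or.inr rfl)
        · exact Or.inr ⟨h1, h2⟩
    · rw [if_neg hi]
      obtain ⟨hn, hm⟩ := ih s0 h0
      refine ⟨hn, fun x => ?_⟩
      rw [hm x]
      simp only [List.mem_cons]
      constructor
      · rintro (h | ⟨h1, h2⟩)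
        · exact Or.inl h
        · exact Or.inr ⟨Or.inr h1, h2⟩
      · rintro (h | ⟨(rfl | h1), h2⟩)
        · exact Or.inl h
        · exact absurd h2 hi
        · exact Or.inr ⟨h1, h2⟩

def indentedP (line : List Char) : Bool :=
  PySem.Chars.startswith line [' ', ' '] || PySem.Chars.startswith line ['\t']

theorem outer_fold :
    ∀ (L : List (List Char)) (s0 : PySem.Set (List Char)) (k0 : Nat), s0.Nodup →
      ((L.foldl altStep (s0, k0)).1.Nodup ∧
       (∀ x, x ∈ (L.foldl altStep (s0, k0)).1 ↔
          x ∈ s0 ∨ (x ∈ codeIndicatorsB ∧ ∃ l ∈ L, PySem.Chars.isIn x l = true)) ∧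
       (L.foldl altStep (s0, k0)).2 = k0 + L.countP indentedP) := by
  intro L
  induction L with
  | nil => intro s0 k0 h0; simp [h0]
  | cons line rest ih =>
    intro s0 k0 h0
    simp only [List.foldl_cons]
    have hstep : altStep (s0, k0) line =
        (codeIndicatorsB.foldl (fun s ind => if PySem.Chars.isIn ind line then PySem.Set.add s ind else s) s0,
         if indentedP line then k0 + 1 else k0) := by
      unfold altStep indentedP
      split <;> rfl
    rw [hstep]
    obtain ⟨hn1, hm1⟩ := inner_fold line codeIndicatorsB s0 h0
    obtain ⟨hn, hm, hk⟩ := ih _ (if indentedP line then k0 + 1 else k0) hn1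
    refine ⟨hn, fun x => ?_, ?_⟩
    · rw [hm x, hm1 x]
      simp only [List.mem_cons]
      constructor
      · rintro ((h | ⟨h1, h2⟩) | ⟨h1, l, hl, h2⟩)
        · exact Or.inl h
        · exact Or.inr ⟨h1, line, Or.inl rfl, h2⟩
        · exact Or.inr ⟨h1, l, Or.inr hl, h2⟩
      · rintro (h | ⟨h1, l, (rfl | hl), h2⟩)
        · exact Or.inl (Or.inl h)
        · exact Or.inl (Or.inr ⟨h1, h2⟩)
        · exact Or.inr ⟨h1, l, hl, h2⟩
    · rw [hk, List.countP_cons]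
      by_cases hil : indentedP line = true
      · simp [hil]; omega
      · simp at hil; simp [hil]

theorem indicators_wf : ∀ x ∈ codeIndicatorsB, '\n' ∉ x ∧ x ≠ [] := by decide

theorem indicators_nodup : codeIndicatorsB.Nodup := by decide

theorem len_final (text : String) :
    ((PySem.Chars.splitOn text.toList ['\n']).foldl altStep (PySem.Set.empty, 0)).1.length =
      codeIndicatorsA.countP (fun ind => PySem.Chars.isIn ind text.toList) := by
  obtain ⟨hn, hm, _⟩ := outer_fold (PySem.Chars.splitOn text.toList ['\n']) PySem.Set.empty 0 (by simp [PySem.Set.empty])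
  have hAB : codeIndicatorsA = codeIndicatorsB := rfl
  rw [hAB, List.countP_eq_length_filter]
  have hperm : ((PySem.Chars.splitOn text.toList ['\n']).foldl altStep (PySem.Set.empty, 0)).1.Perm
      (codeIndicatorsB.filter (fun ind => PySem.Chars.isIn ind text.toList)) := by
    rw [List.perm_ext_iff_of_nodup hn (indicators_nodup.filter _)]
    intro x
    rw [hm x, List.mem_filter]
    simp only [PySem.Set.empty, List.not_mem_nil, false_or]
    constructor
    · rintro ⟨h1, l, hl, h2⟩
      refine ⟨h1, (isIn_iff_exists_line x text.toList (indicators_wf x h1).1 (indicators_wf x h1).2).mpr ?_⟩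
      rw [splitOn_newline] at hl
      exact ⟨l, hl, h2⟩
    · rintro ⟨h1, h2⟩
      obtain ⟨l, hl, h3⟩ := (isIn_iff_exists_line x text.toList (indicators_wf x h1).1 (indicators_wf x h1).2).mp h2
      exact ⟨h1, l, by rw [splitOn_newline]; exact hl, h3⟩
  simpa using hperm.length_eq

-- ===== VERDICT (by name: the statement is the Claim_ definition above) =====
theorem looks_like_code_py_spec : Claim_equal_looks_like_code_py := by
  intro text _
  unfold Spec_looks_like_code_py looks_like_code_py looks_like_code_py_alt
  simp only []
  obtain ⟨_, _, hk⟩ := outer_fold (PySem.Chars.splitOn text.toList ['\n']) PySem.Set.empty 0 (by simp [PySem.Set.empty])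
  rw [hk]
  simp only [PySem.Set.len, len_final text]
  simp [indentedP]
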